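-- pv_equiv track=rewrite | github.com/vschs007/scrapcodes | bits.py | setBitCount
-- ===== SOURCE A (Python) =====
-- def countset(n):
--     count =0
--     while(n):
--         n &= (n-1)
--         count+=1
--     return count
--
-- def setBitCount (L, K):
--     #trivial solution
--     res = countset(L)
--     #need to subtract this.
--     if res >=K:
--         return L
--     else:
--         K = K-res
--     R = L+1
--     while(True):
--         temp = countset(R)
--         if temp >= K:
--             return R
--         else:
--             K-=temp
--             R+=1
-- ===== SOURCE B (Python) =====
-- def _prefix_popcount(n):
--     # total number of set bits among the integers 0 .. n-1, per-bit closed form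
--     total = 0
--     p = 1
--     while p <= n:
--         total += (n // (2 * p)) * p
--         rem = n % (2 * p) - p
--         if rem > 0:
--             total += rem
--         p *= 2
--     return total
--
-- def setBitCount(L, K):
--     target = _prefix_popcount(L) + K
--     lo = L
--     hi = L + (K if K > 0 else 0) + 1
--     while lo < hi:
--         mid = (lo + hi) // 2
--         if _prefix_popcount(mid + 1) >= target:
--             hi = mid
--         else:
--             lo = mid + 1
--     return lo
-- ===== Notes on version B (the rewrite author's own statement) =====
-- stated objective: faster
-- what changed: Replaces the per-integer Kernighan-popcount linear scan with a closed-form per-bit prefix-popcount formula and a binary search for the least R with prefix(R+1) >= prefix(L)+K.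
import Mathlib
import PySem

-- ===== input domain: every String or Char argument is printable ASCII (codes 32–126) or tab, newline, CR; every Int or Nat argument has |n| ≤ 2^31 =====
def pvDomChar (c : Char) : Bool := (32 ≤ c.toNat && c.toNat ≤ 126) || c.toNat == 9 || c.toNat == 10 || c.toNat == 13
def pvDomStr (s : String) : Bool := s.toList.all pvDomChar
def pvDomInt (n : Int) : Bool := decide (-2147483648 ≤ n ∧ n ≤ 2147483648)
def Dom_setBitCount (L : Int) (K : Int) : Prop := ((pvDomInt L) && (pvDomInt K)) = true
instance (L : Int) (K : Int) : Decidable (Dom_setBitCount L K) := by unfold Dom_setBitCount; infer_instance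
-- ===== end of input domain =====

-- B replaces A's per-integer Kernighan-popcount scan by a closed-form prefix-popcount formula
-- plus a binary search for the least R with prefix(R+1) ≥ prefix(L)+K (objective: faster).


-- ===== PORT A =====

-- `n &= n - 1` clears the lowest set bit of a positive n; cited by `decreasing_by` of countsetLoop.
theorem pvBandPredLt (n : Int) (h : ¬ n ≤ 0) : (PySem.Int.band n (n - 1)).toNat < n.toNat := by
  rw [PySem.Int.band_of_nonneg (by omega) (by omega)]
  have h2 := Nat.and_le_right (n := n.toNat) (m := (n - 1).toNat)
  simp only [Int.toNat_natCast]
  omega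

-- Python: `count = 0; while n: n &= n-1; count += 1; return count`.
-- For n < 0 Python's loop never terminates (outside Pre_); the `n ≤ 0` guard makes the port total there.
def countsetLoop (n : Int) (count : Int) : Int :=
  if n ≤ 0 then count
  else countsetLoop (PySem.Int.band n (n - 1)) (count + 1)
termination_by n.toNat
decreasing_by exact pvBandPredLt n (by assumption)

def countset (n : Int) : Int := countsetLoop n 0

-- Python: `R = L+1; while True: temp = countset(R); if temp >= K: return R; else: K -= temp; R += 1`.
-- Under Pre_ the loop is entered with R = L+1 ≥ 1, where countset R ≥ 1; the `R ≤ 0` and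
-- `temp ≤ 0` branches are totality guards only, both unreachable under Pre_.
def setBitCountLoop (R : Int) (K : Int) : Int :=
  if R ≤ 0 then 0
  else
    let temp := countset R
    if temp ≥ K then R
    else if temp ≤ 0 then 0
    else setBitCountLoop (R + 1) (K - temp)
termination_by K.toNat
decreasing_by omega

def setBitCount (L : Int) (K : Int) : Int :=
  let res := countset L
  if res ≥ K then L
  else setBitCountLoop (L + 1) (K - res)

-- ===== PORT B =====

-- positivity of the doubled stride; cited at prefixPopLoop's recursive call
theorem pvTwoMulPos (p : Int) (hp : 0 < p) : 0 < 2 * p := by omega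

-- Python: `p = 1; while p <= n: total += (n // (2*p)) * p; rem = n % (2*p) - p; if rem > 0: total += rem; p *= 2`
def prefixPopLoop (n : Int) (p : Int) (total : Int) (hp : 0 < p) : Int :=
  if p ≤ n then
    let total := total + PySem.Int.floordiv n (2 * p) * p
    let rem := PySem.Int.mod n (2 * p) - p
    let total := if rem > 0 then total + rem else total
    prefixPopLoop n (2 * p) total (pvTwoMulPos p hp)
  else total
termination_by (n + 1 - p).toNat
decreasing_by omega

-- number of set bits among the integers 0 .. n-1 (closed form, per bit)
def prefixPop (n : Int) : Int := prefixPopLoop n 1 0 Int.one_pos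

-- Python: `while lo < hi: mid = (lo+hi)//2; if _prefix_popcount(mid+1) >= target: hi = mid else: lo = mid+1`
def bsearchLoop (target : Int) (lo : Int) (hi : Int) : Int :=
  if lo < hi then
    let mid := PySem.Int.floordiv (lo + hi) 2
    if prefixPop (mid + 1) ≥ target then bsearchLoop target lo mid
    else bsearchLoop target (mid + 1) hi
  else lo
termination_by (hi - lo).toNat
decreasing_by
  · have hlt := (PySem.Int.floordiv_lt_iff_lt_mul (a := lo + hi) (b := 2) (q := hi) (by omega)).mpr (by omega)
    omega
  · have := PySem.Int.floordiv_two_mid_bounds (by omega : lo ≤ hi)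
    omega

def setBitCount_alt (L : Int) (K : Int) : Int :=
  let target := prefixPop L + K
  let lo := L
  let hi := L + (if K > 0 then K else 0) + 1
  bsearchLoop target lo hi

-- ===== PRECONDITION & SPEC =====

-- Pre_ excludes L < 0: there Python's countset(L) never terminates (n &= n-1 keeps a negative
-- number negative), so A returns on exactly the inputs with L ≥ 0.
def Pre_setBitCount (L : Int) (K : Int) : Prop := 0 ≤ L
instance (L : Int) (K : Int) : Decidable (Pre_setBitCount L K) := by unfold Pre_setBitCount; infer_instance

def pvWitness_setBitCount : Int × Int := (5, 3)

def Spec_setBitCount (L : Int) (K : Int) (out : Int) : Prop := out = setBitCount_alt L K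
instance (L : Int) (K : Int) (out : Int) : Decidable (Spec_setBitCount L K out) := by unfold Spec_setBitCount; infer_instance

-- ===== CLAIM (what is proved, stated in full; the proofs are below) =====
def Claim_equal_setBitCount : Prop := ∀ (L : Int) (K : Int), Dom_setBitCount L K → Pre_setBitCount L K → Spec_setBitCount L K (setBitCount L K)

-- ===== LEMMAS AND PROOFS =====

-- reference prefix-popcount: PP n = Σ_{i<n} popcount i, with popcount = PySem.Int.bitCount
def PP : Nat → Nat
  | 0 => 0
  | n + 1 => PP n + PySem.Int.bitCount (n : Int)

-- Int-valued wrapper used to state both characterizations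
def PPi (x : Int) : Int := (PP x.toNat : Int)

-- "r is the least R ≥ L whose cumulative popcount Σ_{i=L}^{R} popcount i reaches K"
def IsAns (L K r : Int) : Prop :=
  L ≤ r ∧ PPi L + K ≤ PPi (r + 1) ∧ ∀ z, L ≤ z → z < r → PPi (z + 1) < PPi L + K

theorem isAns_unique (L K r r' : Int) (h : IsAns L K r) (h' : IsAns L K r') : r = r' := by
  obtain ⟨hr1, hr2, hr3⟩ := h
  obtain ⟨hr1', hr2', hr3'⟩ := h'
  by_contra hne
  rcases lt_trichotomy r r' with hlt | heq | hlt
  · exact absurd hr2 (not_le.mpr (hr3' r hr1 hlt))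
  · exact hne heq
  · exact absurd hr2' (not_le.mpr (hr3 r' hr1' hlt))

-- ---- A-side: countset computes bitCount, and setBitCount satisfies IsAns ----

theorem land_odd (a : Nat) (h : a % 2 = 1) : a &&& (a - 1) = a - 1 := by
  apply Nat.eq_of_testBit_eq
  intro i
  cases i with
  | zero =>
    rw [Nat.testBit_land, Nat.testBit_zero]
    have : (a - 1) % 2 = 0 := by omega
    simp [this, h]
  | succ i =>
    rw [Nat.testBit_land, Nat.testBit_succ, Nat.testBit_succ]
    have : (a - 1) / 2 = a / 2 := by omega
    rw [this, Bool.and_self]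

theorem land_even (a : Nat) (h : a % 2 = 0) (h0 : 0 < a) :
    a &&& (a - 1) = 2 * ((a / 2) &&& (a / 2 - 1)) := by
  apply Nat.eq_of_testBit_eq
  intro i
  cases i with
  | zero =>
    rw [Nat.testBit_land, Nat.testBit_zero]
    have h2 : (2 * (a / 2 &&& (a / 2 - 1))) % 2 = 0 := by omega
    simp [h, h2]
  | succ i =>
    rw [Nat.testBit_land, Nat.testBit_succ, Nat.testBit_succ, Nat.testBit_succ]
    have h1 : (a - 1) / 2 = a / 2 - 1 := by omega
    have h2 : (2 * (a / 2 &&& (a / 2 - 1))) / 2 = a / 2 &&& (a / 2 - 1) := by omega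
    rw [h1, h2, Nat.testBit_land]

theorem bc_double (b : Nat) : PySem.Int.bitCount ((2 * b : Nat) : Int) = PySem.Int.bitCount (b : Int) := by
  rcases Nat.eq_zero_or_pos b with h | h
  · simp [h]
  · rw [PySem.Int.bitCount_natCast (by omega : 0 < 2 * b)]
    have h1 : (2 * b) % 2 = 0 := by omega
    have h2 : (2 * b) / 2 = b := by omega
    rw [h1, h2]
    omega

theorem kern (a : Nat) (h : 0 < a) :
    PySem.Int.bitCount ((a &&& (a - 1) : Nat) : Int) + 1 = PySem.Int.bitCount (a : Int) := by
  induction a using Nat.strong_induction_on with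
  | _ a ih =>
    rcases (by omega : a % 2 = 1 ∨ a % 2 = 0) with hp | hp
    · rw [land_odd a hp, PySem.Int.bitCount_natCast h, hp]
      rcases (by omega : a = 1 ∨ 2 ≤ a) with h1 | h1
      · subst h1; simp
      · rw [PySem.Int.bitCount_natCast (by omega : 0 < a - 1)]
        have e1 : (a - 1) % 2 = 0 := by omega
        have e2 : (a - 1) / 2 = a / 2 := by omega
        rw [e1, e2]
        omega
    · rw [land_even a hp h, bc_double, PySem.Int.bitCount_natCast h, hp]
      have hhalf : 0 < a / 2 := by omega
      have := ih (a / 2) (by omega) hhalf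
      omega

-- both band facts, for the proofs (the port's decreasing_by cites only the slim pvBandPredLt)
theorem band_facts (n : Int) (h : 0 < n) :
    0 ≤ PySem.Int.band n (n - 1) ∧ PySem.Int.band n (n - 1) < n := by
  rw [PySem.Int.band_of_nonneg (by omega) (by omega)]
  have h2 := Nat.and_le_right (n := n.toNat) (m := (n - 1).toNat)
  omega

theorem bc_band (n : Int) (h : 0 < n) :
    PySem.Int.bitCount (PySem.Int.band n (n - 1)) + 1 = PySem.Int.bitCount n := by
  have ha : n = ((n.toNat : Nat) : Int) := by omega
  rw [ha]
  have h1 : ((n.toNat : Nat) : Int) - 1 = ((n.toNat - 1 : Nat) : Int) := by omega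
  rw [h1, PySem.Int.band_natCast]
  exact kern n.toNat (by omega)

theorem countsetLoop_eq (n count : Int) (h : 0 ≤ n) :
    countsetLoop n count = count + (PySem.Int.bitCount n : Int) := by
  induction hm : n.toNat using Nat.strong_induction_on generalizing n count with
  | _ m ih =>
    rw [countsetLoop]
    by_cases h0 : n ≤ 0
    · rw [if_pos h0]
      have : n = 0 := by omega
      subst this
      simp
    · rw [if_neg h0]
      obtain ⟨hb0, hb1⟩ := band_facts n (by omega)
      rw [ih (PySem.Int.band n (n - 1)).toNat (by omega) _ _ hb0 rfl]
      have := bc_band n (by omega)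
      omega

theorem countset_eq (n : Int) (h : 0 ≤ n) : countset n = (PySem.Int.bitCount n : Int) := by
  unfold countset; rw [countsetLoop_eq n 0 h]; omega

theorem PPi_succ (x : Int) (h : 0 ≤ x) : PPi (x + 1) = PPi x + (PySem.Int.bitCount x : Int) := by
  unfold PPi
  have h1 : (x + 1).toNat = x.toNat + 1 := by omega
  rw [h1]
  show ((PP x.toNat + PySem.Int.bitCount ((x.toNat : Nat) : Int) : Nat) : Int) = _
  rw [Int.toNat_of_nonneg h]
  push_cast
  ring

theorem PP_mono (m n : Nat) (h : m ≤ n) : PP m ≤ PP n := by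
  have key : ∀ k, PP m ≤ PP (m + k) := by
    intro k
    induction k with
    | zero => simp
    | succ k ihk =>
      have : PP (m + (k + 1)) = PP (m + k) + PySem.Int.bitCount ((m + k : Nat) : Int) := rfl
      omega
  have := key (n - m)
  have e : m + (n - m) = n := by omega
  rwa [e] at this

theorem PPi_mono (x y : Int) (h : x ≤ y) : PPi x ≤ PPi y := by
  unfold PPi
  have := PP_mono x.toNat y.toNat (by omega)
  omega

theorem bc_pos (m : Nat) (h : 0 < m) : 1 ≤ PySem.Int.bitCount (m : Int) := by
  induction m using Nat.strong_induction_on with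
  | _ m ih =>
    rw [PySem.Int.bitCount_natCast h]
    rcases (by omega : m % 2 = 1 ∨ (m % 2 = 0 ∧ 0 < m / 2)) with hp | ⟨hp, hq⟩
    · omega
    · have := ih (m / 2) (by omega) hq
      omega

theorem bc_pos_int (x : Int) (h : 0 < x) : 1 ≤ (PySem.Int.bitCount x : Int) := by
  have ha : x = ((x.toNat : Nat) : Int) := by omega
  rw [ha]
  have := bc_pos x.toNat (by omega)
  omega

theorem loop_isAns (R K : Int) (hR : 1 ≤ R) (hK : 1 ≤ K) :
    IsAns R K (setBitCountLoop R K) := by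
  induction hm : K.toNat using Nat.strong_induction_on generalizing R K with
  | _ m ih =>
    rw [setBitCountLoop, if_neg (by omega : ¬ R ≤ 0)]
    simp only
    have hc : countset R = (PySem.Int.bitCount R : Int) := countset_eq R (by omega)
    by_cases ht : countset R ≥ K
    · rw [if_pos ht]
      refine ⟨le_refl R, ?_, by omega⟩
      rw [PPi_succ R (by omega)]
      omega
    · rw [if_neg ht]
      have hbc : 1 ≤ (PySem.Int.bitCount R : Int) := bc_pos_int R (by omega)
      rw [if_neg (by omega : ¬ countset R ≤ 0)]
      have hrec := ih (K - countset R).toNat (by omega) (R + 1) (K - countset R)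
        (by omega) (by omega) rfl
      obtain ⟨h1, h2, h3⟩ := hrec
      have hstep : PPi (R + 1) = PPi R + (PySem.Int.bitCount R : Int) := PPi_succ R (by omega)
      refine ⟨by omega, by omega, ?_⟩
      intro z hz1 hz2
      rcases (by omega : z = R ∨ R + 1 ≤ z) with rfl | hz3
      · omega
      · have := h3 z hz3 hz2
        omega

theorem A_isAns (L K : Int) (h : 0 ≤ L) : IsAns L K (setBitCount L K) := by
  unfold setBitCount
  simp only
  have hc : countset L = (PySem.Int.bitCount L : Int) := countset_eq L h
  have hstep : PPi (L + 1) = PPi L + (PySem.Int.bitCount L : Int) := PPi_succ L h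
  by_cases hres : countset L ≥ K
  · rw [if_pos hres]
    exact ⟨le_refl L, by omega, by omega⟩
  · rw [if_neg hres]
    obtain ⟨h1, h2, h3⟩ := loop_isAns (L + 1) (K - countset L) (by omega) (by omega)
    refine ⟨by omega, by omega, ?_⟩
    intro z hz1 hz2
    rcases (by omega : z = L ∨ L + 1 ≤ z) with rfl | hz3
    · omega
    · have := h3 z hz3 hz2
      omega

-- ---- B-side: the closed form computes PP, the binary search finds the least R ----

-- Nat model of the prefix loop (the Int loop is its cast; the `0 < p` conjunct is its termination guard)
def ppl (n p : Nat) : Nat :=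
  if h : p ≤ n ∧ 0 < p then
    (n / (2 * p)) * p + (n % (2 * p) - p) + ppl n (2 * p)
  else 0
termination_by n + 1 - p
decreasing_by omega

theorem prefixPopLoop_eq (n p total : Int) (hp : 0 < p) (hn : 0 ≤ n) :
    prefixPopLoop n p total hp = total + (ppl n.toNat p.toNat : Int) := by
  lift n to Nat using hn
  induction hm : ((n : Int) + 1 - p).toNat using Nat.strong_induction_on generalizing p total with
  | _ m ih =>
    have hp0 : (0 : Int) ≤ p := by omega
    lift p to Nat using hp0
    rw [prefixPopLoop, ppl]
    simp only [Int.toNat_natCast]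
    by_cases hpn : (p : Int) ≤ (n : Int)
    · rw [if_pos hpn, dif_pos (by omega : p ≤ n ∧ 0 < p)]
      rw [ih ((n : Int) + 1 - 2 * (p : Int)).toNat (by omega) (2 * (p : Int)) _ (by omega) rfl]
      have e1 : ((2 : Int) * (p : Int)).toNat = 2 * p := by omega
      have hc2 : (2 : Int) * (p : Int) = ((2 * p : Nat) : Int) := by push_cast; ring
      rw [e1, hc2, PySem.Int.floordiv_natCast, PySem.Int.mod_natCast]
      have hprod : ((n / (2 * p) : Nat) : Int) * ((p : Nat) : Int)
          = ((n / (2 * p) * p : Nat) : Int) := by push_cast; ring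
      rw [hprod]
      simp only [Int.toNat_natCast]
      split_ifs with hrem
      · omega
      · omega
    · rw [if_neg hpn, dif_neg (by omega : ¬ (p ≤ n ∧ 0 < p))]
      omega

theorem ppl_delta (e n : Nat) :
    ppl (n + 1) (2 ^ e) = ppl n (2 ^ e) + PySem.Int.bitCount ((n / 2 ^ e : Nat) : Int) := by
  induction hm : (n + 2 - 2 ^ e) using Nat.strong_induction_on generalizing e with
  | _ m ih =>
    have hpos : 0 < 2 ^ e := Nat.two_pow_pos e
    by_cases h1 : 2 ^ e ≤ n
    · -- both loops iterate
      have hsucc : 2 * 2 ^ e = 2 ^ (e + 1) := by rw [pow_succ]; ring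
      have hpos1 : 0 < 2 ^ (e + 1) := Nat.two_pow_pos (e + 1)
      have IH : ppl (n + 1) (2 * 2 ^ e)
          = ppl n (2 * 2 ^ e) + PySem.Int.bitCount ((n / (2 * 2 ^ e) : Nat) : Int) := by
        rw [hsucc]
        exact ih (n + 2 - 2 ^ (e + 1)) (by omega) (e + 1) rfl
      conv_lhs => rw [ppl]
      conv_rhs => rw [ppl]
      rw [dif_pos (⟨by omega, hpos⟩ : 2 ^ e ≤ n + 1 ∧ 0 < 2 ^ e),
          dif_pos (⟨h1, hpos⟩ : 2 ^ e ≤ n ∧ 0 < 2 ^ e), IH]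
      have hq : 0 < n / 2 ^ e := Nat.div_pos h1 hpos
      have hbc : PySem.Int.bitCount ((n / 2 ^ e : Nat) : Int)
          = (n / 2 ^ e) % 2 + PySem.Int.bitCount ((n / 2 ^ e / 2 : Nat) : Int) :=
        PySem.Int.bitCount_natCast hq
      have hdd : n / 2 ^ e / 2 = n / (2 * 2 ^ e) := by
        rw [Nat.div_div_eq_div_mul, Nat.mul_comm]
      rw [hbc, hdd]
      -- remaining: T(n+1,e) + Z + B = T(n,e) + Z + ((n/2^e) % 2 + B)
      set D := 2 * 2 ^ e with hD
      have hD0 : 0 < D := by omega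
      set q := n / D with hq'
      set r := n % D with hr'
      have hqr : D * q + r = n := Nat.div_add_mod n D
      have hr : r < D := Nat.mod_lt n hD0
      have hnd : n / 2 ^ e = 2 * q + r / 2 ^ e := by
        have h' : n = 2 ^ e * (2 * q) + r := by rw [← hqr]; ring
        rw [h', Nat.mul_add_div hpos]
      set s := r / 2 ^ e with hs'
      have hs : (2 ^ e ≤ r → s = 1) ∧ (r < 2 ^ e → s = 0) := by
        constructor
        · intro h'
          rw [hs']
          exact Nat.div_eq_of_lt_le (by omega) (by omega)
        · intro h'
          rw [hs']
          exact Nat.div_eq_of_lt h'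
      rcases (by omega : r + 1 < D ∨ r + 1 = D) with hcase | hcase
      · have hdm := (Nat.div_mod_unique hD0 (a := n + 1) (d := q) (c := r + 1)).mpr
          ⟨by omega, hcase⟩
        have e1 : (n + 1) / D * 2 ^ e = q * 2 ^ e := by rw [hdm.1]
        have e2 : n / D * 2 ^ e = q * 2 ^ e := by rw [← hq']
        rw [e1, e2, hdm.2, hnd]
        rcases (by omega : 2 ^ e ≤ r ∨ r < 2 ^ e) with h5 | h5
        · have := hs.1 h5
          omega
        · have := hs.2 h5
          omega
      · have hDq : D * (q + 1) = D * q + D := by ring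
        have hdm := (Nat.div_mod_unique hD0 (a := n + 1) (d := q + 1) (c := 0)).mpr
          ⟨by omega, by omega⟩
        have e1 : (n + 1) / D * 2 ^ e = q * 2 ^ e + 2 ^ e := by rw [hdm.1]; ring
        have e2 : n / D * 2 ^ e = q * 2 ^ e := by rw [← hq']
        have h5 : 2 ^ e ≤ r := by omega
        have := hs.1 h5
        rw [e1, e2, hdm.2, hnd]
        omega
    · rcases (by omega : 2 ^ e = n + 1 ∨ n + 1 < 2 ^ e) with h2 | h2
      · conv_lhs => rw [ppl]
        rw [dif_pos (⟨by omega, hpos⟩ : 2 ^ e ≤ n + 1 ∧ 0 < 2 ^ e)]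
        have hd0 : (n + 1) / (2 * 2 ^ e) = 0 := Nat.div_eq_of_lt (by omega)
        have hm0 : (n + 1) % (2 * 2 ^ e) = n + 1 := Nat.mod_eq_of_lt (by omega)
        rw [hd0, hm0, ppl, dif_neg (by omega : ¬ (2 * 2 ^ e ≤ n + 1 ∧ 0 < 2 * 2 ^ e)),
            ppl, dif_neg (by omega : ¬ (2 ^ e ≤ n ∧ 0 < 2 ^ e)),
            Nat.div_eq_of_lt (by omega : n < 2 ^ e)]
        simp
        omega
      · rw [ppl, dif_neg (by omega : ¬ (2 ^ e ≤ n + 1 ∧ 0 < 2 ^ e)),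
            ppl, dif_neg (by omega : ¬ (2 ^ e ≤ n ∧ 0 < 2 ^ e)),
            Nat.div_eq_of_lt (by omega : n < 2 ^ e)]
        simp

theorem ppl_one (n : Nat) : ppl n 1 = PP n := by
  induction n with
  | zero => rw [ppl]; simp [PP]
  | succ n ihn =>
    have := ppl_delta 0 n
    rw [pow_zero, Nat.div_one] at this
    rw [this, ihn]
    rfl

theorem prefixPop_eq (n : Int) (h : 0 ≤ n) : prefixPop n = PPi n := by
  unfold prefixPop PPi
  rw [prefixPopLoop_eq n 1 0 (by omega) h]
  have : (1 : Int).toNat = 1 := rfl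
  rw [this, ppl_one]
  omega

theorem bsearch_spec (target lo hi : Int) (h0 : 0 ≤ lo) (hle : lo ≤ hi)
    (hhi : target ≤ PPi (hi + 1)) :
    lo ≤ bsearchLoop target lo hi ∧ target ≤ PPi (bsearchLoop target lo hi + 1) ∧
      ∀ z, lo ≤ z → z < bsearchLoop target lo hi → PPi (z + 1) < target := by
  induction hm : (hi - lo).toNat using Nat.strong_induction_on generalizing lo hi with
  | _ m ih =>
    rw [bsearchLoop]
    by_cases hlt : lo < hi
    · rw [if_pos hlt]
      simp only
      have hb := PySem.Int.floordiv_two_mid_bounds (by omega : lo ≤ hi)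
      have hmlt := (PySem.Int.floordiv_lt_iff_lt_mul (a := lo + hi) (b := 2) (q := hi)
        (by omega)).mpr (by omega)
      set mid := PySem.Int.floordiv (lo + hi) 2 with hmid
      have hpp : prefixPop (mid + 1) = PPi (mid + 1) := prefixPop_eq _ (by omega)
      by_cases hc : prefixPop (mid + 1) ≥ target
      · rw [if_pos hc]
        exact ih (mid - lo).toNat (by omega) lo mid h0 (by omega) (by omega) rfl
      · rw [if_neg hc]
        obtain ⟨r1, r2, r3⟩ := ih (hi - (mid + 1)).toNat (by omega) (mid + 1) hi
          (by omega) (by omega) hhi rfl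
        refine ⟨by omega, r2, ?_⟩
        intro z hz1 hz2
        rcases (by omega : z ≤ mid ∨ mid + 1 ≤ z) with hz3 | hz3
        · have := PPi_mono (z + 1) (mid + 1) (by omega)
          omega
        · exact r3 z hz3 hz2
    · rw [if_neg hlt]
      have : lo = hi := by omega
      subst this
      exact ⟨le_refl lo, hhi, by omega⟩

theorem PP_growth (a m : Nat) (h : 1 ≤ a) : PP a + m ≤ PP (a + m) := by
  induction m with
  | zero => simp
  | succ k ihk =>
    have he : PP (a + (k + 1)) = PP (a + k) + PySem.Int.bitCount ((a + k : Nat) : Int) := rfl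
    have := bc_pos (a + k) (by omega)
    omega

theorem PPi_growth (x m : Int) (hx : 1 ≤ x) (hm : 0 ≤ m) : PPi x + m ≤ PPi (x + m) := by
  unfold PPi
  have := PP_growth x.toNat m.toNat (by omega)
  have e : (x + m).toNat = x.toNat + m.toNat := by omega
  rw [e]
  omega

theorem B_isAns (L K : Int) (h : 0 ≤ L) : IsAns L K (setBitCount_alt L K) := by
  unfold setBitCount_alt
  simp only
  rw [prefixPop_eq L h]
  set hi := L + (if K > 0 then K else 0) + 1 with hhi_def
  have hhi : PPi L + K ≤ PPi (hi + 1) := by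
    rw [hhi_def]
    split_ifs with hK
    · have hg := PPi_growth (L + 1) (K + 1) (by omega) (by omega)
      have e : L + 1 + (K + 1) = L + K + 1 + 1 := by ring
      rw [e] at hg
      have hst := PPi_succ L h
      omega
    · have := PPi_mono L (L + 0 + 1 + 1) (by omega)
      omega
  have hlohi : L ≤ hi := by
    rw [hhi_def]
    split_ifs <;> omega
  obtain ⟨r1, r2, r3⟩ := bsearch_spec (PPi L + K) L hi h hlohi hhi
  exact ⟨r1, r2, r3⟩

-- ===== VERDICT (by name: the statement is the Claim_ definition above) =====
theorem setBitCount_spec : Claim_equal_setBitCount := by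
  intro L K _ hpre
  unfold Spec_setBitCount
  exact isAns_unique L K _ _ (A_isAns L K hpre) (B_isAns L K hpre)
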